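-- pv_equiv track=rewrite | github.com/Hunter5Thompson/Alpha_01 | rag_agent/chunking.py | _chunk_tokens
-- ===== SOURCE A (Python) =====
-- from typing import Iterable, Iterator, List
--
-- def _chunk_tokens(sentences: Iterable[str], max_tokens: int, overlap: int) -> Iterator[str]:
--     window: List[str] = []
--     token_counts: List[int] = []
--
--     for sentence in sentences:
--         tokens = sentence.split()
--         token_counts.append(len(tokens))
--         window.append(sentence)
--
--         while sum(token_counts) > max_tokens and window:
--             window.pop(0)
--             token_counts.pop(0)
--
--         if sum(token_counts) >= max_tokens - overlap:
--             yield " ".join(window)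
--             # apply overlap by keeping last overlap tokens
--             overlap_tokens = overlap
--             trimmed_window: List[str] = []
--             trimmed_counts: List[int] = []
--             for s, c in zip(reversed(window), reversed(token_counts)):
--                 if overlap_tokens <= 0:
--                     break
--                 trimmed_window.insert(0, s)
--                 trimmed_counts.insert(0, c)
--                 overlap_tokens -= c
--             window = trimmed_window
--             token_counts = trimmed_counts
--
--     if window:
--         yield " ".join(window)
-- ===== SOURCE B (Python) =====
-- from typing import Iterable, Iterator, List, Tuple
--
-- def _chunk_tokens(sentences: Iterable[str], max_tokens: int, overlap: int) -> Iterator[str]: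
--     # One pass with a running token total and a lazy front pointer: no sum() rescans,
--     # no pop(0)/insert(0) shifting.
--     win: List[Tuple[str, int]] = []  # (sentence, token count); front trimmed lazily via `start`
--     start = 0
--     total = 0
--     for sentence in sentences:
--         c = len(sentence.split())
--         win.append((sentence, c))
--         total += c
--         while total > max_tokens and start < len(win):
--             total -= win[start][1]
--             start += 1
--         if total >= max_tokens - overlap:
--             yield " ".join(s for s, _ in win[start:])
--             # keep the shortest suffix whose token sum reaches `overlap`
--             i = len(win)
--             rem = overlap
--             while start < i and rem > 0:
--                 i -= 1
--                 rem -= win[i][1]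
--             win = win[i:]
--             start = 0
--             total = overlap - rem
--     if start < len(win):
--         yield " ".join(s for s, _ in win[start:])
-- ===== Notes on version B (the rewrite author's own statement) =====
-- stated objective: faster
-- what changed: Replaces per-sentence sum() rescans and O(w) pop(0)/insert(0) shifting with one running token total, a lazy front pointer into a list of (sentence, count) pairs, and an index scan from the back for the overlap suffix.
import Mathlib
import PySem

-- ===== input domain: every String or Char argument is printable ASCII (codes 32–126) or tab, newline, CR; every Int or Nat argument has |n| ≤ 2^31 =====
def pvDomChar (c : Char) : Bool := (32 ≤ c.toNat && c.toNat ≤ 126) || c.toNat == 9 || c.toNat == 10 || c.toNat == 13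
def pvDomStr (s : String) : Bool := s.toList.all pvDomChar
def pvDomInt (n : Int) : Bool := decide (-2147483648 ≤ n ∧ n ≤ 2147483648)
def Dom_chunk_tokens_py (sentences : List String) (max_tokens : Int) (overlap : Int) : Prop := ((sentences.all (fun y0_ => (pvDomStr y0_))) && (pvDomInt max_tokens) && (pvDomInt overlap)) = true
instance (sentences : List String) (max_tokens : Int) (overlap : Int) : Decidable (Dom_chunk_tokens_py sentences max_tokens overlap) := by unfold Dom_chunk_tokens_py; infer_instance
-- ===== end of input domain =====

-- B replaces A's repeated sum() scans and pop(0)/insert(0) shifting by a running token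
-- total with a lazy front pointer over (sentence, count) pairs (objective: faster).


-- ===== PORT A =====
-- the inner `while sum(token_counts) > max_tokens and window: window.pop(0); token_counts.pop(0)`
def popLoopA (max_tokens : Int) (window : List String) (counts : List Int) :
    List String × List Int :=
  if counts.sum > max_tokens ∧ window ≠ [] then
    popLoopA max_tokens window.tail counts.tail
  else (window, counts)
termination_by window.length
decreasing_by
  cases window with
  | nil => simp at *
  | cons a t => simp

-- the overlap-trimming `for s, c in zip(reversed(window), reversed(token_counts)): …`
-- (builds trimmed_window/trimmed_counts with insert(0, _))
def trimLoopA : List (String × Int) → Int → List String → List Int → List String × List Int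
  | [], _, tw, tc => (tw, tc)
  | (s, c) :: rest, ov, tw, tc =>
    if ov ≤ 0 then (tw, tc)
    else trimLoopA rest (ov - c) (s :: tw) (c :: tc)

-- the main `for sentence in sentences` loop, then the trailing `if window: yield …`
def chunkLoopA (max_tokens overlap : Int) :
    List String → List String → List Int → List String
  | [], window, _ =>
    if window ≠ [] then [PySem.Str.join " " window] else []
  | sentence :: rest, window, counts =>
    let tokens := PySem.Str.split₀ sentence
    let counts := counts ++ [Int.ofNat tokens.length]
    let window := window ++ [sentence]
    let wc := popLoopA max_tokens window counts
    if wc.2.sum ≥ max_tokens - overlap then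
      let tt := trimLoopA ((wc.1.reverse).zip (wc.2.reverse)) overlap [] []
      PySem.Str.join " " wc.1 :: chunkLoopA max_tokens overlap rest tt.1 tt.2
    else
      chunkLoopA max_tokens overlap rest wc.1 wc.2

def chunk_tokens_py (sentences : List String) (max_tokens : Int) (overlap : Int) : List String :=
  chunkLoopA max_tokens overlap sentences [] []

-- ===== PORT B =====
-- `while total > max_tokens and start < len(win): total -= win[start][1]; start += 1`
def advLoopB (max_tokens : Int) (win : List (String × Int)) (start : Nat) (total : Int) :
    Nat × Int :=
  if h : total > max_tokens ∧ start < win.length then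
    advLoopB max_tokens win (start + 1) (total - (win[start]'h.2).2)
  else (start, total)
termination_by win.length - start
decreasing_by omega

-- `i = len(win); rem = overlap; while start < i and rem > 0: i -= 1; rem -= win[i][1]`
def backLoopB (win : List (String × Int)) (start : Nat) (i : Nat) (rem : Int) : Nat × Int :=
  if _h : start < i ∧ rem > 0 then
    backLoopB win start (i - 1) (rem - ((win.getD (i - 1) ("", 0)).2))
  else (i, rem)
termination_by i
decreasing_by omega

def chunkLoopB (max_tokens overlap : Int) :
    List String → List (String × Int) → Nat → Int → List String
  | [], win, start, _ =>
    if start < win.length then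
      [PySem.Str.join " " ((win.drop start).map Prod.fst)]
    else []
  | sentence :: rest, win, start, total =>
    let c := Int.ofNat (PySem.Str.split₀ sentence).length
    let win := win ++ [(sentence, c)]
    let st := advLoopB max_tokens win start (total + c)
    if st.2 ≥ max_tokens - overlap then
      let ir := backLoopB win st.1 win.length overlap
      PySem.Str.join " " ((win.drop st.1).map Prod.fst) ::
        chunkLoopB max_tokens overlap rest (win.drop ir.1) 0 (overlap - ir.2)
    else
      chunkLoopB max_tokens overlap rest win st.1 st.2

def chunk_tokens_py_alt (sentences : List String) (max_tokens : Int) (overlap : Int) : List String :=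
  chunkLoopB max_tokens overlap sentences [] 0 0

-- ===== PRECONDITION & SPEC =====
def Spec_chunk_tokens_py (sentences : List String) (max_tokens : Int) (overlap : Int) (out : List String) : Prop := out = chunk_tokens_py_alt sentences max_tokens overlap
instance (sentences : List String) (max_tokens : Int) (overlap : Int) (out : List String) : Decidable (Spec_chunk_tokens_py sentences max_tokens overlap out) := by unfold Spec_chunk_tokens_py; infer_instance

-- ===== CLAIM (what is proved, stated in full; the proofs are below) =====
def Claim_equal_chunk_tokens_py : Prop := ∀ (sentences : List String) (max_tokens : Int) (overlap : Int), Dom_chunk_tokens_py sentences max_tokens overlap → Spec_chunk_tokens_py sentences max_tokens overlap (chunk_tokens_py sentences max_tokens overlap)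

-- ===== LEMMAS AND PROOFS =====
theorem trimLoopA_nonpos (l : List (String × Int)) (ov : Int) (hov : ov ≤ 0)
    (tw : List String) (tc : List Int) : trimLoopA l ov tw tc = (tw, tc) := by
  cases l with
  | nil => rfl
  | cons p rest => simp [trimLoopA, hov]

theorem popLoopA_adv (max_tokens : Int) (win : List (String × Int)) :
    ∀ start total, start ≤ win.length →
      total = ((win.drop start).map Prod.snd).sum →
      popLoopA max_tokens ((win.drop start).map Prod.fst) ((win.drop start).map Prod.snd)
        = ((win.drop (advLoopB max_tokens win start total).1).map Prod.fst,
           (win.drop (advLoopB max_tokens win start total).1).map Prod.snd)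
      ∧ (advLoopB max_tokens win start total).2
          = ((win.drop (advLoopB max_tokens win start total).1).map Prod.snd).sum
      ∧ (advLoopB max_tokens win start total).1 ≤ win.length := by
  intro start total
  induction hn : win.length - start generalizing start total with
  | zero =>
    intro hle htot
    have hstart : start = win.length := by omega
    subst hstart
    rw [advLoopB]
    simp only [List.drop_length, List.map_nil, List.sum_nil] at htot
    simp [popLoopA, htot]
  | succ n ih =>
    intro hle htot
    have hlt : start < win.length := by omega
    have hdrop : win.drop start = win[start] :: win.drop (start + 1) :=
      List.drop_eq_getElem_cons hlt
    by_cases hc : total > max_tokens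
    · rw [advLoopB]
      rw [dif_pos ⟨hc, hlt⟩]
      have h1 : popLoopA max_tokens ((win.drop start).map Prod.fst) ((win.drop start).map Prod.snd)
          = popLoopA max_tokens ((win.drop (start + 1)).map Prod.fst) ((win.drop (start + 1)).map Prod.snd) := by
        rw [popLoopA]
        rw [if_pos]
        · rw [hdrop]; simp only [List.map_cons, List.tail_cons]
        · constructor
          · rw [← htot]; exact hc
          · rw [hdrop]; simp
            omega
      rw [h1]
      exact ih (start + 1) (total - win[start].2) (by omega) (by omega)
        (by rw [htot, hdrop]; simp only [List.map_cons, List.sum_cons]; ring)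
    · rw [advLoopB]
      rw [dif_neg (by tauto)]
      constructor
      · rw [popLoopA]
        rw [if_neg]
        intro ⟨h1, _⟩
        exact hc (htot ▸ h1)
      · exact ⟨htot, by omega⟩

theorem backLoopB_trim (win : List (String × Int)) (start : Nat) :
    ∀ i rem, start ≤ i → i ≤ win.length →
      trimLoopA (((win.drop start).take (i - start)).reverse) rem
          ((win.drop i).map Prod.fst) ((win.drop i).map Prod.snd)
        = ((win.drop (backLoopB win start i rem).1).map Prod.fst,
           (win.drop (backLoopB win start i rem).1).map Prod.snd)
      ∧ (backLoopB win start i rem).2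
          + (((win.drop (backLoopB win start i rem).1).take (i - (backLoopB win start i rem).1)).map Prod.snd).sum
          = rem
      ∧ start ≤ (backLoopB win start i rem).1 ∧ (backLoopB win start i rem).1 ≤ i := by
  intro i
  induction i with
  | zero =>
    intro rem h1 h2
    rw [backLoopB, dif_neg (by omega)]
    have hs : start = 0 := by omega
    subst hs
    exact ⟨by simp [trimLoopA], by simp, by omega, by omega⟩
  | succ k ih =>
    intro rem h1 h2
    by_cases hc : start < k + 1 ∧ rem > 0
    · rw [backLoopB, dif_pos hc]
      have hk : k < win.length := by omega
      have hgetD : win.getD (k + 1 - 1) ("", 0) = win[k] := by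
        simp [List.getD_eq_getElem?_getD, List.getElem?_eq_getElem hk]
      rw [hgetD]
      simp only [Nat.add_sub_cancel]
      have hdropk : win.drop k = win[k] :: win.drop (k + 1) :=
        List.drop_eq_getElem_cons hk
      have hseg : ((win.drop start).take (k + 1 - start)).reverse
          = win[k] :: ((win.drop start).take (k - start)).reverse := by
        have e1 : k + 1 - start = (k - start) + 1 := by omega
        rw [e1, List.take_add_one]
        have e2 : (win.drop start)[k - start]? = some win[k] := by
          rw [List.getElem?_drop]
          have e3 : start + (k - start) = k := by omega
          rw [e3, List.getElem?_eq_getElem hk]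
        rw [e2]
        simp
      rw [hseg, trimLoopA, if_neg (by omega)]
      obtain ⟨IH1, IH2, IH3, IH4⟩ := ih (rem - win[k].2) (by omega) (by omega)
      refine ⟨?_, ?_, by omega, by omega⟩
      · have e7 : List.map Prod.fst (win.drop k) = win[k].1 :: List.map Prod.fst (win.drop (k + 1)) := by
          rw [hdropk]; simp only [List.map_cons]
        have e8 : List.map Prod.snd (win.drop k) = win[k].2 :: List.map Prod.snd (win.drop (k + 1)) := by
          rw [hdropk]; simp only [List.map_cons]
        rw [← e7, ← e8]
        exact IH1
      · set i' := (backLoopB win start k (rem - win[k].2)).1 with hi'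
        have e4 : k + 1 - i' = (k - i') + 1 := by omega
        rw [e4, List.take_add_one]
        have e5 : (win.drop i')[k - i']? = some win[k] := by
          rw [List.getElem?_drop]
          have e6 : i' + (k - i') = k := by omega
          rw [e6, List.getElem?_eq_getElem hk]
        rw [e5]
        simp only [Option.toList_some, List.map_append, List.sum_append,
          List.map_cons, List.map_nil, List.sum_cons, List.sum_nil]
        omega
    · rw [backLoopB, dif_neg hc]
      refine ⟨?_, by simp, by omega, by omega⟩
      rcases not_and_or.mp hc with h | h
      · have hs : start = k + 1 := by omega
        subst hs
        simp [trimLoopA]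
      · have hov : rem ≤ 0 := by omega
        exact trimLoopA_nonpos _ rem hov _ _

theorem chunkLoop_eq (max_tokens overlap : Int) (sentences : List String) :
    ∀ win start total, start ≤ win.length →
      total = ((win.drop start).map Prod.snd).sum →
      chunkLoopA max_tokens overlap sentences
          ((win.drop start).map Prod.fst) ((win.drop start).map Prod.snd)
        = chunkLoopB max_tokens overlap sentences win start total := by
  induction sentences with
  | nil =>
    intro win start total hle htot
    simp only [chunkLoopA, chunkLoopB]
    by_cases h : start < win.length
    · have hne : (win.drop start).map Prod.fst ≠ [] := by
        simp only [ne_eq, List.map_eq_nil_iff]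
        intro he
        have := congrArg List.length he
        simp at this
        omega
      rw [if_pos hne, if_pos h]
    · have hd : win.drop start = [] := List.drop_eq_nil_of_le (by omega)
      rw [if_neg (by simp [hd]), if_neg h]
  | cons s rest ih =>
    intro win start total hle htot
    simp only [chunkLoopA, chunkLoopB]
    set c : Int := Int.ofNat (PySem.Str.split₀ s).length with hc
    set win' : List (String × Int) := win ++ [(s, c)] with hwin'
    have hda : (win').drop start = win.drop start ++ [(s, c)] :=
      List.drop_append_of_le_length hle
    have hmf : (win.drop start).map Prod.fst ++ [s] = (win'.drop start).map Prod.fst := by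
      rw [hda]; simp
    have hms : (win.drop start).map Prod.snd ++ [c] = (win'.drop start).map Prod.snd := by
      rw [hda]; simp
    rw [hmf, hms]
    have hle' : start ≤ win'.length := by simp [hwin']; omega
    have htot' : total + c = ((win'.drop start).map Prod.snd).sum := by
      rw [hda]; simp [htot]
    obtain ⟨P1, P2, P3⟩ := popLoopA_adv max_tokens win' start (total + c) hle' htot'
    rw [P1]
    set a1 : Nat := (advLoopB max_tokens win' start (total + c)).1 with ha1
    have hfull : ∀ j, (win'.drop j).take (win'.length - j) = win'.drop j := by
      intro j
      rw [← List.length_drop, List.take_length]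
    by_cases hcond : (advLoopB max_tokens win' start (total + c)).2 ≥ max_tokens - overlap
    · rw [if_pos (by rw [← P2]; exact hcond), if_pos hcond]
      have hzip : (((win'.drop a1).map Prod.fst).reverse).zip
            (((win'.drop a1).map Prod.snd).reverse) = (win'.drop a1).reverse := by
        rw [← List.map_reverse, ← List.map_reverse, List.zip_map']
        simp
      rw [hzip]
      obtain ⟨T1, T2, T3, T4⟩ := backLoopB_trim win' a1 win'.length overlap P3 (le_refl _)
      rw [hfull a1] at T1
      simp only [List.drop_length, List.map_nil] at T1
      rw [T1]
      set i2 : Nat := (backLoopB win' a1 win'.length overlap).1 with hi2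
      rw [hfull i2] at T2
      congr 1
      have := ih (win'.drop i2) 0 (overlap - (backLoopB win' a1 win'.length overlap).2)
        (by omega) (by simp only [List.drop_zero]; omega)
      simpa only [List.drop_zero] using this
    · rw [if_neg (by rw [← P2]; exact hcond), if_neg hcond]
      exact ih win' a1 _ P3 P2

-- ===== VERDICT (by name: the statement is the Claim_ definition above) =====
theorem chunk_tokens_py_spec : Claim_equal_chunk_tokens_py := by
  intro sentences max_tokens overlap _
  unfold Spec_chunk_tokens_py chunk_tokens_py chunk_tokens_py_alt
  simpa using chunkLoop_eq max_tokens overlap sentences [] 0 0 (by simp) (by simp)
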